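-- pv_equiv track=rewrite | github.com/guru-code-expert/OpenTrace | opto/optimizers/optoprime_v2.py | strip_nested_blocks
-- ===== SOURCE A (Python) =====
-- def strip_nested_blocks(text: str, tag: str) -> str:
--     """Remove all nested <tag>...</tag> blocks from text, leaving only the top-level text."""
--     result = ''
--     start_tag = f'<{tag}>'
--     end_tag = f'</{tag}>'
--     stack = []
--     i = 0
--     last = 0
--     while i < len(text):
--         if text.startswith(start_tag, i):
--             if not stack:
--                 result += text[last:i]
--             stack.append(i)
--             i += len(start_tag)
--         elif text.startswith(end_tag, i):
--             if stack:
--                 stack.pop()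
--                 if not stack:
--                     last = i + len(end_tag)
--             i += len(end_tag)
--         else:
--             i += 1
--     if not stack:
--         result += text[last:]
--     return result.strip()
-- ===== SOURCE B (Python) =====
-- def strip_nested_blocks(text: str, tag: str) -> str:
--     """Remove all nested <tag>...</tag> blocks from text, leaving only the top-level text."""
--     start_tag = f'<{tag}>'
--     end_tag = f'</{tag}>'
--     depth = 0
--     kept = []
--     i = 0
--     n = len(text)
--     while i < n:
--         if text.startswith(start_tag, i):
--             depth += 1
--             i += len(start_tag)
--         elif text.startswith(end_tag, i):
--             if depth > 0:
--                 depth -= 1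
--             else:
--                 kept.append(end_tag)
--             i += len(end_tag)
--         else:
--             if depth == 0:
--                 kept.append(text[i])
--             i += 1
--     return ''.join(kept).strip()
-- ===== Notes on version B (the rewrite author's own statement) =====
-- stated objective: alternative
-- what changed: Replaces A's stack of start positions with lazy slice emission (result += text[last:i] at block boundaries) by a depth counter with eager per-character/per-tag accumulation into a kept list.
import Mathlib
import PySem

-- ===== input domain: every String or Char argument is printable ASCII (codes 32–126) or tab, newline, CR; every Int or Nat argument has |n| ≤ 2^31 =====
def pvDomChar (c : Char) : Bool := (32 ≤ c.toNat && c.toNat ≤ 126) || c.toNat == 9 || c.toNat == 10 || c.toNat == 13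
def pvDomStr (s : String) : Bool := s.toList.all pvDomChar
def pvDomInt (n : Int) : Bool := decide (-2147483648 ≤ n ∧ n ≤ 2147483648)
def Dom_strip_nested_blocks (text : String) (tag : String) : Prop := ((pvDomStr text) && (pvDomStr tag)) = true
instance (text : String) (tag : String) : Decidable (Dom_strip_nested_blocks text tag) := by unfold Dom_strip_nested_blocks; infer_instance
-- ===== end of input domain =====

-- B replaces A's stack of start positions and lazy slice emission by a depth counter with
-- per-character accumulation (objective: simpler; same O(n·|tag|) cost).

-- ===== PORT A =====
-- A's while loop; fuel starts at text.length, i strictly increases each iteration, so fuel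
-- never runs out before i ≥ length (the fuel-0 case coincides with loop exit).
def stripA_loop (tl start_ end_ : List Char) : Nat → Nat → Nat → List Nat → List Char → List Char
  | 0, _, last, stack, result => if stack.isEmpty then result ++ tl.drop last else result
  | f+1, i, last, stack, result =>
    if i < tl.length then
      if start_.isPrefixOf (tl.drop i) then
        -- text.startswith(start_tag, i)
        let result := if stack.isEmpty then result ++ (tl.drop last).take (i - last) else result
        stripA_loop tl start_ end_ f (i + start_.length) last (i :: stack) result
      else if end_.isPrefixOf (tl.drop i) then
        if stack.isEmpty then
          -- stray top-level end tag: i advances, last does not (the tag stays in result)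
          stripA_loop tl start_ end_ f (i + end_.length) last stack result
        else
          -- stack.pop(); if not stack: last = i + len(end_tag)
          let stack := stack.tail
          let last := if stack.isEmpty then i + end_.length else last
          stripA_loop tl start_ end_ f (i + end_.length) last stack result
      else stripA_loop tl start_ end_ f (i + 1) last stack result
    else if stack.isEmpty then result ++ tl.drop last else result

def strip_nested_blocks (text : String) (tag : String) : String :=
  String.ofList (PySem.Chars.strip (stripA_loop text.toList
    ('<' :: (tag.toList ++ ['>'])) ('<' :: '/' :: (tag.toList ++ ['>']))
    text.toList.length 0 0 [] []))

-- ===== PORT B =====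
def stripB_loop (tl start_ end_ : List Char) : Nat → Nat → Nat → List Char → List Char
  | 0, _, _, kept => kept
  | f+1, i, depth, kept =>
    if i < tl.length then
      if start_.isPrefixOf (tl.drop i) then
        stripB_loop tl start_ end_ f (i + start_.length) (depth + 1) kept
      else if end_.isPrefixOf (tl.drop i) then
        if depth > 0 then stripB_loop tl start_ end_ f (i + end_.length) (depth - 1) kept
        else stripB_loop tl start_ end_ f (i + end_.length) depth (kept ++ end_)
      else
        let kept := if depth = 0 then kept ++ (tl.drop i).take 1 else kept
        stripB_loop tl start_ end_ f (i + 1) depth kept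
    else kept

def strip_nested_blocks_alt (text : String) (tag : String) : String :=
  String.ofList (PySem.Chars.strip (stripB_loop text.toList
    ('<' :: (tag.toList ++ ['>'])) ('<' :: '/' :: (tag.toList ++ ['>']))
    text.toList.length 0 0 []))

-- ===== PRECONDITION & SPEC =====
def Spec_strip_nested_blocks (text : String) (tag : String) (out : String) : Prop := out = strip_nested_blocks_alt text tag
instance (text : String) (tag : String) (out : String) : Decidable (Spec_strip_nested_blocks text tag out) := by unfold Spec_strip_nested_blocks; infer_instance

-- ===== CLAIM (what is proved, stated in full; the proofs are below) =====
def Claim_equal_strip_nested_blocks : Prop := ∀ (text : String) (tag : String), Dom_strip_nested_blocks text tag → Spec_strip_nested_blocks text tag (strip_nested_blocks text tag)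

-- ===== LEMMAS AND PROOFS =====

lemma prefix_take {xs p : List Char} (h : p.isPrefixOf xs = true) :
    xs.take p.length = p := by
  rw [List.isPrefixOf_iff_prefix] at h
  obtain ⟨t, rfl⟩ := h
  simp

-- slice text[last:j] splits at i (last ≤ i ≤ j)
lemma slice_split (tl : List Char) (last i k : Nat) (h : last ≤ i) :
    (tl.drop last).take (i + k - last) =
      (tl.drop last).take (i - last) ++ (tl.drop i).take k := by
  have : i + k - last = (i - last) + k := by omega
  rw [this, List.take_add]
  congr 2
  rw [List.drop_drop]
  congr 1
  omega

lemma stripAB (tl start_ end_ : List Char) (hs1 : 0 < start_.length)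
    (he1 : 0 < end_.length) (f i last : Nat) (stack : List Nat)
    (result : List Char) (hli : last ≤ i) (hf : tl.length ≤ i + f) :
    stripA_loop tl start_ end_ f i last stack result =
      stripB_loop tl start_ end_ f i stack.length
        (result ++ if stack.isEmpty then (tl.drop last).take (i - last) else []) := by
  induction f generalizing i last stack result with
  | zero =>
    simp only [stripA_loop, stripB_loop]
    cases stack with
    | nil =>
      have : (tl.drop last).take (i - last) = tl.drop last :=
        List.take_of_length_le (by simp; omega)
      simp [this]
    | cons a s => simp
  | succ f ih =>
    simp only [stripA_loop, stripB_loop]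
    by_cases hi : i < tl.length
    · rw [if_pos hi, if_pos hi]
      by_cases hs : start_.isPrefixOf (tl.drop i) = true
      · rw [if_pos hs, if_pos hs]
        rw [ih (i + start_.length) last _ _ (by omega) (by omega)]
        cases stack <;> simp
      · rw [if_neg hs, if_neg hs]
        by_cases he : end_.isPrefixOf (tl.drop i) = true
        · rw [if_pos he, if_pos he]
          cases stack with
          | nil =>
            rw [ih (i + end_.length) last _ _ (by omega) (by omega)]
            rw [slice_split tl last i end_.length hli, prefix_take he]
            simp
          | cons a s =>
            cases s with
            | nil =>
              simp only [List.isEmpty_cons, Bool.false_eq_true, if_false, List.tail_cons,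
                List.isEmpty_nil, if_true, List.length_cons, List.length_nil,
                Nat.add_sub_cancel]
              rw [if_pos (by omega)]
              rw [ih (i + end_.length) (i + end_.length) [] _ (le_refl _) (by omega)]
              simp
            | cons b s' =>
              simp only [List.isEmpty_cons, Bool.false_eq_true, if_false, List.tail_cons,
                List.length_cons, Nat.add_sub_cancel]
              rw [if_pos (by omega)]
              rw [ih (i + end_.length) last (b :: s') _ (by omega) (by omega)]
              simp
        · rw [if_neg he, if_neg he]
          cases stack with
          | nil =>
            rw [ih (i + 1) last _ _ (by omega) (by omega)]
            rw [slice_split tl last i 1 hli]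
            simp
          | cons a s =>
            rw [ih (i + 1) last _ _ (by omega) (by omega)]
            simp
    · rw [if_neg hi, if_neg hi]
      cases stack with
      | nil =>
        have : (tl.drop last).take (i - last) = tl.drop last :=
          List.take_of_length_le (by simp; omega)
        simp [this]
      | cons a s => simp

-- ===== VERDICT (by name: the statement is the Claim_ definition above) =====
theorem strip_nested_blocks_spec : Claim_equal_strip_nested_blocks := by
  intro text tag _
  unfold Spec_strip_nested_blocks strip_nested_blocks strip_nested_blocks_alt
  rw [stripAB _ _ _ (by simp) (by simp) _ 0 0 [] [] (le_refl _) (by omega)]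
  simp
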